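-- pv_equiv track=rewrite | github.com/marcottelab/FluorosequencingImageAnalysis | jupyter_development.py | split_heatmap
-- ===== SOURCE A (Python) =====
-- def split_heatmap(num_cycles, cycle):
--     all_SD_signals = [(('A', c),) for c in range(1, num_cycles + 1)]
--     all_DD_signals = [(('A', b), ('A', c))
--                       for c in range(1, num_cycles + 1)
--                       for b in range(1, c)]
--     before_cycle = (
--                     [(((aa, c),), True, 1)
--                      for ((aa, c),) in all_SD_signals if c < cycle]
--                     +
--                     [(((aa1, b), (aa2, c)), True, 2)
--                        for ((aa1, b), (aa2, c)) in all_DD_signals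
--                        if c < cycle]
--                    )
--     after_cycle = (
--                     [(((aa, c),), True, 1)
--                      for ((aa, c),) in all_SD_signals if c >= cycle]
--                     +
--                     [(((aa1, b), (aa2, c)), True, 2)
--                        for ((aa1, b), (aa2, c)) in all_DD_signals
--                        if c >= cycle]
--                    )
--     return tuple(before_cycle), tuple(after_cycle)
-- ===== SOURCE B (Python) =====
-- def split_heatmap(num_cycles, cycle):
--     # Monotonicity: signals are generated in increasing c, so the c < cycle test
--     # is equivalent to a single arithmetic split point k; each bucket is then
--     # generated directly from its own range, with no filtering or branching.
--     k = min(max(cycle, 1), num_cycles + 1)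
--     before = ([((('A', c),), True, 1) for c in range(1, k)]
--               + [((('A', b), ('A', c)), True, 2)
--                  for c in range(1, k) for b in range(1, c)])
--     after = ([((('A', c),), True, 1) for c in range(k, num_cycles + 1)]
--              + [((('A', b), ('A', c)), True, 2)
--                 for c in range(k, num_cycles + 1) for b in range(1, c)])
--     return tuple(before), tuple(after)
-- ===== Notes on version B (the rewrite author's own statement) =====
-- stated objective: alternative
-- what changed: B replaces A's generate-then-filter-twice structure by computing the split point k = min(max(cycle,1), num_cycles+1) arithmetically and generating each bucket directly from its own index range, with no filtering or per-element test at all (correct because signals are generated in increasing c).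
import Mathlib
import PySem

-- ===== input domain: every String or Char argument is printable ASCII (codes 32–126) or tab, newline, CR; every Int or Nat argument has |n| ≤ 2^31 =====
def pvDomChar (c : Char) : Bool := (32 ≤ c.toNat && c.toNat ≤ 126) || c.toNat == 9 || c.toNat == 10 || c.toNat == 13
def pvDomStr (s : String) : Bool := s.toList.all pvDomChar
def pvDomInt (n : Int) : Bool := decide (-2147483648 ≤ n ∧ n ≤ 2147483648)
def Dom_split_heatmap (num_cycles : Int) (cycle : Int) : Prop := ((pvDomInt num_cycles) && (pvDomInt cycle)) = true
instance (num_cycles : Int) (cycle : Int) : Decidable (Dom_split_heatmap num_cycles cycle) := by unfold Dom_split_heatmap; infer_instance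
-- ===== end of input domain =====

-- B computes the before/after split point k arithmetically (the signals are generated in
-- increasing c) and generates each bucket directly from its own index range, with no
-- filtering at all (alternative decomposition; same asymptotic cost).

-- ===== PORT A =====
def split_heatmap (num_cycles : Int) (cycle : Int) : (List ((List (String × Int)) × Bool × Int)) × (List ((List (String × Int)) × Bool × Int)) :=
  let all_SD_signals : List (List (String × Int)) :=
    (PySem.List.pyRange 1 (num_cycles + 1) 1).map (fun c => [("A", c)])
  let all_DD_signals : List (List (String × Int)) :=
    (PySem.List.pyRange 1 (num_cycles + 1) 1).flatMap (fun c =>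
      (PySem.List.pyRange 1 c 1).map (fun b => [("A", b), ("A", c)]))
  let before_cycle :=
    (all_SD_signals.filterMap (fun s => match s with
        | [(aa, c)] => if c < cycle then some ([(aa, c)], true, (1 : Int)) else none
        | _ => none))
    ++
    (all_DD_signals.filterMap (fun s => match s with
        | [(aa1, b), (aa2, c)] => if c < cycle then some ([(aa1, b), (aa2, c)], true, (2 : Int)) else none
        | _ => none))
  let after_cycle :=
    (all_SD_signals.filterMap (fun s => match s with
        | [(aa, c)] => if cycle ≤ c then some ([(aa, c)], true, (1 : Int)) else none
        | _ => none))
    ++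
    (all_DD_signals.filterMap (fun s => match s with
        | [(aa1, b), (aa2, c)] => if cycle ≤ c then some ([(aa1, b), (aa2, c)], true, (2 : Int)) else none
        | _ => none))
  (before_cycle, after_cycle)

-- ===== PORT B =====
def split_heatmap_alt (num_cycles : Int) (cycle : Int) : (List ((List (String × Int)) × Bool × Int)) × (List ((List (String × Int)) × Bool × Int)) :=
  let k : Int := min (max cycle 1) (num_cycles + 1)
  let before :=
    (PySem.List.pyRange 1 k 1).map (fun c => ([("A", c)], true, (1 : Int)))
    ++
    (PySem.List.pyRange 1 k 1).flatMap (fun c =>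
      (PySem.List.pyRange 1 c 1).map (fun b => ([("A", b), ("A", c)], true, (2 : Int))))
  let after :=
    (PySem.List.pyRange k (num_cycles + 1) 1).map (fun c => ([("A", c)], true, (1 : Int)))
    ++
    (PySem.List.pyRange k (num_cycles + 1) 1).flatMap (fun c =>
      (PySem.List.pyRange 1 c 1).map (fun b => ([("A", b), ("A", c)], true, (2 : Int))))
  (before, after)

-- ===== PRECONDITION & SPEC =====
def Spec_split_heatmap (num_cycles : Int) (cycle : Int) (out : (List ((List (String × Int)) × Bool × Int)) × (List ((List (String × Int)) × Bool × Int))) : Prop := out = split_heatmap_alt num_cycles cycle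
instance (num_cycles : Int) (cycle : Int) (out : (List ((List (String × Int)) × Bool × Int)) × (List ((List (String × Int)) × Bool × Int))) : Decidable (Spec_split_heatmap num_cycles cycle out) := by unfold Spec_split_heatmap; infer_instance

-- ===== CLAIM =====
def Claim_equal_split_heatmap : Prop := ∀ (num_cycles : Int) (cycle : Int), Dom_split_heatmap num_cycles cycle → Spec_split_heatmap num_cycles cycle (split_heatmap num_cycles cycle)

-- ===== LEMMAS AND PROOFS =====

-- filterMap with an if-some-none body = filter then map
theorem pv_filterMap_ite {α β : Type} (p : α → Prop) [DecidablePred p] (f : α → β)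
    (L : List α) :
    L.filterMap (fun x => if p x then some (f x) else none)
      = (L.filter (fun x => decide (p x))).map f := by
  induction L with
  | nil => simp
  | cons a t ih => by_cases hp : p a <;> simp [hp, ih]

-- flatMap of if-then-else-nil = filter then flatMap
theorem pv_flatMap_ite {α β : Type} (p : α → Prop) [DecidablePred p] (h : α → List β)
    (L : List α) :
    L.flatMap (fun c => if p c then h c else [])
      = (L.filter (fun c => decide (p c))).flatMap h := by
  induction L with
  | nil => simp
  | cons a t ih => by_cases hp : p a <;> simp [hp, ih]

theorem pv_filterMap_const {p : Prop} [Decidable p] {α β : Type} (f : α → β) (L : List α) :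
    L.filterMap (fun b => if p then some (f b) else none)
      = if p then L.map f else [] := by
  by_cases hp : p <;> simp [hp]

-- the key monotonicity fact: filtering range(1, m) by c < cycle is the range up to
-- the clamped split point k, and filtering by cycle ≤ c is the range from k on
theorem pv_filter_lt (cycle m : Int) :
    (PySem.List.pyRange 1 m 1).filter (fun c => decide (c < cycle))
      = PySem.List.pyRange 1 (min (max cycle 1) m) 1 := by
  by_cases hm : m ≤ 1
  · rw [PySem.List.pyRange_one_eq_nil hm, PySem.List.pyRange_one_eq_nil (by omega)]
    simp
  · rw [PySem.List.pyRange_one_append 1 (min (max cycle 1) m) m (by omega) (by omega),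
      List.filter_append]
    have h1 : (PySem.List.pyRange 1 (min (max cycle 1) m) 1).filter (fun c => decide (c < cycle))
        = PySem.List.pyRange 1 (min (max cycle 1) m) 1 := by
      apply List.filter_eq_self.mpr
      intro x hx
      rw [PySem.List.mem_pyRange_one] at hx
      simp only [decide_eq_true_eq]
      omega
    have h2 : (PySem.List.pyRange (min (max cycle 1) m) m 1).filter (fun c => decide (c < cycle))
        = [] := by
      apply List.filter_eq_nil_iff.mpr
      intro x hx
      rw [PySem.List.mem_pyRange_one] at hx
      simp only [decide_eq_true_eq]
      omega
    rw [h1, h2, List.append_nil]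

theorem pv_filter_ge (cycle m : Int) :
    (PySem.List.pyRange 1 m 1).filter (fun c => decide (cycle ≤ c))
      = PySem.List.pyRange (min (max cycle 1) m) m 1 := by
  by_cases hm : m ≤ 1
  · rw [PySem.List.pyRange_one_eq_nil hm, PySem.List.pyRange_one_eq_nil (by omega)]
    simp
  · rw [PySem.List.pyRange_one_append 1 (min (max cycle 1) m) m (by omega) (by omega),
      List.filter_append]
    have h1 : (PySem.List.pyRange 1 (min (max cycle 1) m) 1).filter (fun c => decide (cycle ≤ c))
        = [] := by
      apply List.filter_eq_nil_iff.mpr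
      intro x hx
      rw [PySem.List.mem_pyRange_one] at hx
      simp only [decide_eq_true_eq]
      omega
    have h2 : (PySem.List.pyRange (min (max cycle 1) m) m 1).filter (fun c => decide (cycle ≤ c))
        = PySem.List.pyRange (min (max cycle 1) m) m 1 := by
      apply List.filter_eq_self.mpr
      intro x hx
      rw [PySem.List.mem_pyRange_one] at hx
      simp only [decide_eq_true_eq]
      omega
    rw [h1, h2, List.nil_append]

-- ===== VERDICT =====
theorem split_heatmap_spec : Claim_equal_split_heatmap := by
  intro num_cycles cycle _
  unfold Spec_split_heatmap split_heatmap split_heatmap_alt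
  simp only [List.filterMap_map, List.filterMap_flatMap, Function.comp_def]
  rw [pv_filterMap_ite (fun c : Int => c < cycle) (fun c => ([("A", c)], true, (1 : Int))),
    pv_filterMap_ite (fun c : Int => cycle ≤ c) (fun c => ([("A", c)], true, (1 : Int)))]
  simp only [pv_filterMap_const, pv_flatMap_ite]
  rw [pv_filter_lt cycle (num_cycles + 1), pv_filter_ge cycle (num_cycles + 1)]
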